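-- pv_equiv track=rewrite | github.com/XinNoil/PyTools | basictorch_v3/tools.py | join_cmds
-- ===== SOURCE A (Python) =====
-- def is_cmd(cmd):
--     return (not cmd.startswith('#')) and len(cmd)
--
-- def join_cmds(cmds):
--     cmds = [_.strip().strip('\\') for _ in cmds]
--     cmds = list(filter(is_cmd, cmds))
--     new_cmds = []
--     new_cmd = None
--     for cmd in cmds:
--         if cmd.startswith('python'):
--             if new_cmd is not None:
--                 new_cmds.append(new_cmd)
--             new_cmd = cmd
--         else:
--             if new_cmd is None:
--                 raise Exception('first line has to startwiths python')
--             new_cmd += cmd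
--     if new_cmd is not None:
--         new_cmds.append(new_cmd)
--     return new_cmds
-- ===== SOURCE B (Python) =====
-- def join_cmds(cmds):
--     lines = [c.strip().strip('\\') for c in cmds]
--     lines = [c for c in lines if c and not c.startswith('#')]
--     if lines and not lines[0].startswith('python'):
--         raise Exception('first line has to startwiths python')
--     out = []
--     i, n = 0, len(lines)
--     while i < n:
--         j = i + 1
--         while j < n and not lines[j].startswith('python'):
--             j += 1
--         out.append(''.join(lines[i:j]))
--         i = j
--     return out
-- ===== Notes on version B (the rewrite author's own statement) =====
-- stated objective: alternative
-- what changed: Replaces A's single-pass pending-accumulator state machine with an explicit segment scan: after cleaning and filtering, a two-pointer loop finds each maximal run starting at a 'python' line and emits ''.join of that slice.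
import Mathlib
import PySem

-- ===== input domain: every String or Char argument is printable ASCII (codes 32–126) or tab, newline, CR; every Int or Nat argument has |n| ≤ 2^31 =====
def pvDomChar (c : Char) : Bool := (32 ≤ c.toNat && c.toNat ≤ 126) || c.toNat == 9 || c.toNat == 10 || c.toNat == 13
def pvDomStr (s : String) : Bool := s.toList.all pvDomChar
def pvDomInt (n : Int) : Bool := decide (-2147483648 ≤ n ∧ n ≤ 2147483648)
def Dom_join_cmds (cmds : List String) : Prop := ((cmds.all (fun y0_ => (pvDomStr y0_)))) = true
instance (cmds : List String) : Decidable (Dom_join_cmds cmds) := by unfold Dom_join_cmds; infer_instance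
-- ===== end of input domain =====

-- B replaces A's single-pass pending-accumulator state machine by a two-pointer segment
-- scan (find each maximal run starting at a 'python' line, join it); alternative, not faster.


-- ===== PORT A =====
-- is_cmd(cmd): (not cmd.startswith('#')) and len(cmd)   (truthiness of the int len)
def is_cmd (cmd : String) : Bool :=
  !(PySem.Str.startswith cmd "#") && (PySem.Str.len cmd != 0)

-- one loop iteration of A: state = (new_cmds, new_cmd); the `raise` branch (pending = none
-- on a non-python line) is excluded by Pre_ below, the port leaves the state unchanged there
def pvStepA (st : List String × Option String) (cmd : String) : List String × Option String :=
  if PySem.Str.startswith cmd "python" then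
    (match st.2 with
     | none => st.1
     | some s => st.1 ++ [s], some cmd)
  else
    match st.2 with
    | none => st            -- Python raises Exception here; outside Pre_
    | some s => (st.1, some (s ++ cmd))

def join_cmds (cmds : List String) : List String :=
  let cleaned := cmds.map (fun c => PySem.Str.stripChars (PySem.Str.strip c) "\\")
  let filtered := cleaned.filter is_cmd
  let st := filtered.foldl pvStepA ([], none)
  match st.2 with
  | none => st.1
  | some s => st.1 ++ [s]

-- ===== PORT B =====
-- the two-pointer scan of Source B: the inner while advances j over non-'python' lines
-- (= takeWhile on the tail), the segment lines[i:j] is joined, then i jumps to j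
def pvSegsB (lines : List String) : List String :=
  match lines with
  | [] => []
  | c :: t =>
    let body := t.takeWhile (fun s => !(PySem.Str.startswith s "python"))
    PySem.Str.join "" (c :: body) :: pvSegsB (t.drop body.length)
termination_by lines.length
decreasing_by
  simp only [List.length_cons]
  have := List.length_drop (l := t)
        (i := (t.takeWhile (fun s => !(PySem.Str.startswith s "python"))).length)
  omega

def join_cmds_alt (cmds : List String) : List String :=
  let lines := (cmds.map (fun c => PySem.Str.stripChars (PySem.Str.strip c) "\\")).filter
      (fun c => c != "" && !(PySem.Str.startswith c "#"))
  -- the `raise` on a nonempty list whose head does not start with 'python' is outside Pre_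
  pvSegsB lines

-- ===== PRECONDITION & SPEC =====
-- Pre_ excludes exactly the inputs where Python A (and B) raise
-- Exception('first line has to startwiths python'): after cleaning and filtering,
-- the first surviving line must start with 'python' (or no line survives).
def Pre_join_cmds (cmds : List String) : Prop :=
  (((cmds.map (fun c => PySem.Str.stripChars (PySem.Str.strip c) "\\")).filter
      (fun c => c != "" && !(PySem.Str.startswith c "#"))).head?.all
      (fun h => PySem.Str.startswith h "python")) = true
instance (cmds : List String) : Decidable (Pre_join_cmds cmds) := by
  unfold Pre_join_cmds; infer_instance

def pvWitness_join_cmds : List String :=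
  ["python a.py \\", "  --lr 1", "# comment", "python b.py"]

def Spec_join_cmds (cmds : List String) (out : List String) : Prop := out = join_cmds_alt cmds
instance (cmds : List String) (out : List String) : Decidable (Spec_join_cmds cmds out) := by
  unfold Spec_join_cmds; infer_instance

-- ===== CLAIM (what is proved, stated in full; the proofs are below) =====
def Claim_equal_join_cmds : Prop :=
  ∀ (cmds : List String), Dom_join_cmds cmds → Pre_join_cmds cmds →
    Spec_join_cmds cmds (join_cmds cmds)

-- ===== LEMMAS AND PROOFS =====

theorem pv_join_empty_nil : PySem.Str.join "" ([] : List String) = "" := by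
  simp [PySem.Str.join, PySem.Chars.join_nil]

theorem pv_join_empty_cons (c : String) (l : List String) :
    PySem.Str.join "" (c :: l) = c ++ PySem.Str.join "" l := by
  cases l with
  | nil =>
    apply String.ext
    simp [PySem.Str.join, PySem.Chars.join_singleton, PySem.Chars.join_nil]
  | cons b t =>
    apply String.ext
    simp [PySem.Str.join, PySem.Chars.join_cons_cons]

-- A's filter predicate equals B's filter predicate
theorem pv_pred_eq (c : String) :
    is_cmd c = (c != "" && !(PySem.Str.startswith c "#")) := by
  rcases eq_or_ne c "" with h | h
  · subst h; decide
  · unfold is_cmd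
    have hL : c.length ≠ 0 := by
      intro h0
      apply h
      apply String.ext
      have h2 : c.toList.length = 0 := by rw [String.length_toList]; exact h0
      simpa using List.eq_nil_of_length_eq_zero h2
    have hlen : (PySem.Str.len c != 0) = true := by
      rw [bne_iff_ne]
      intro h0
      apply hL
      have : (c.length : Int) = 0 := by
        rw [show ((c.length : Int)) = PySem.Str.len c from by simp [PySem.Str.len]]
        exact h0
      exact_mod_cast this
    have hne : (c != "") = true := by simpa using h
    rw [hlen, hne, Bool.and_true, Bool.true_and]

-- A's fold from a pending command s produces the segment s ++ join(body) and
-- then behaves like B's scan on the remainder.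
theorem pv_fold_some (L : List String) (acc : List String) (s : String) :
    (match (L.foldl pvStepA (acc, some s)).2 with
     | none => (L.foldl pvStepA (acc, some s)).1
     | some v => (L.foldl pvStepA (acc, some s)).1 ++ [v]) =
    acc ++ ((s ++ PySem.Str.join ""
              (L.takeWhile (fun x => !(PySem.Str.startswith x "python")))) ::
            pvSegsB (L.drop
              (L.takeWhile (fun x => !(PySem.Str.startswith x "python"))).length)) := by
  induction L generalizing acc s with
  | nil => simp [pv_join_empty_nil, pvSegsB]
  | cons c t ih =>
    by_cases hc : PySem.Str.startswith c "python" = true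
    · have hc' : PySem.Chars.startswith c.toList ['p','y','t','h','o','n'] = true := by
        simpa using hc
      have hstep : pvStepA (acc, some s) c = (acc ++ [s], some c) := by
        simp [pvStepA, hc']
      rw [List.foldl_cons, hstep, ih]
      have htw : (c :: t).takeWhile (fun x => !(PySem.Str.startswith x "python")) = [] := by
        simp [hc']
      rw [htw]
      simp only [List.length_nil, List.drop_zero, pv_join_empty_nil]
      rw [show (s ++ "") = s from by simp]
      rw [show pvSegsB (c :: t) =
            PySem.Str.join "" (c :: t.takeWhile (fun x => !(PySem.Str.startswith x "python"))) ::
            pvSegsB (t.drop (t.takeWhile (fun x => !(PySem.Str.startswith x "python"))).length)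
          from by rw [pvSegsB]]
      rw [pv_join_empty_cons]
      simp only [List.append_assoc, List.singleton_append]
    · have hc' : PySem.Chars.startswith c.toList ['p','y','t','h','o','n'] = false := by
        simpa using hc
      have hstep : pvStepA (acc, some s) c = (acc, some (s ++ c)) := by
        simp [pvStepA, hc']
      rw [List.foldl_cons, hstep, ih]
      have htw : (c :: t).takeWhile (fun x => !(PySem.Str.startswith x "python")) =
          c :: t.takeWhile (fun x => !(PySem.Str.startswith x "python")) := by
        simp [hc']
      rw [htw, pv_join_empty_cons]
      simp only [List.length_cons, List.drop_succ_cons, String.append_assoc]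

-- ===== VERDICT (by name: the statement is the Claim_ definition above) =====
theorem join_cmds_spec : Claim_equal_join_cmds := by
  intro cmds _ hpre
  unfold Spec_join_cmds join_cmds join_cmds_alt
  dsimp only
  rw [show is_cmd = (fun c => c != "" && !(PySem.Str.startswith c "#")) from
    funext pv_pred_eq]
  unfold Pre_join_cmds at hpre
  generalize hL : (cmds.map (fun c => PySem.Str.stripChars (PySem.Str.strip c) "\\")).filter
      (fun c => c != "" && !(PySem.Str.startswith c "#")) = L at hpre ⊢
  cases L with
  | nil => simp [pvSegsB]
  | cons h t =>
    have hh : PySem.Chars.startswith h.toList ['p','y','t','h','o','n'] = true := by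
      simpa using hpre
    have hstep : pvStepA ([], none) h = ([], some h) := by simp [pvStepA, hh]
    rw [List.foldl_cons, hstep, pv_fold_some]
    rw [show pvSegsB (h :: t) =
          PySem.Str.join "" (h :: t.takeWhile (fun x => !(PySem.Str.startswith x "python"))) ::
          pvSegsB (t.drop (t.takeWhile (fun x => !(PySem.Str.startswith x "python"))).length)
        from by rw [pvSegsB]]
    rw [pv_join_empty_cons]
    simp
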